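-- pv_equiv track=rewrite | github.com/daniel-reich/turbo-robot | F77JQs68RSeTBiGtv_10.py | diamond_sum
-- ===== SOURCE A (Python) =====
-- def diamond_sum(n):
--     total = 0
--     diamond_list = []
--     row = []
--     if n == 1:
--         return 1
--     for i in range(1, n*n + 1):
--         row.append(i)
--         if len(row) == n:
--             diamond_list.append(row)
--             row = []
--     top_number = diamond_list[0][(n - 1)//2]
--     bottom_number = diamond_list[n - 1][(n - 1)//2]
--     total += top_number + bottom_number
--     margin = 1
--     for j in range(1, ((n - 1)//2)):
--         total += diamond_list[j][((n - 1)//2) - margin] + diamond_list[j][((n - 1)//2) + margin]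
--         margin += 1
--     total += diamond_list[(n - 1)//2][0] + diamond_list[(n - 1)//2][n - 1]
--     new_margin = 1
--     for k in range((((n - 1)//2) + 1), n - 1):
--         total += diamond_list[k][0 + new_margin] + diamond_list[k][(n - 1) - new_margin]
--         new_margin += 1
--     return total
-- ===== SOURCE B (Python) =====
-- def diamond_sum(n):
--     # O(n): compute each border cell's value from its (row, col) as row*n + col + 1,
--     # without materialising the n*n grid.
--     if n == 1:
--         return 1
--     h = (n - 1) // 2
--     total = (h + 1) + ((n - 1) * n + h + 1)          # top and bottom tips
--     for j in range(1, h):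
--         total += 2 * (j * n + h + 1)                 # row j, cols h-j and h+j
--     total += (h * n + 1) + (h * n + n)               # middle row, cols 0 and n-1
--     for k in range(h + 1, n - 1):
--         total += 2 * k * n + n + 1                   # row k, cols k-h and n-1-(k-h)
--     return total
-- ===== Notes on version B (the rewrite author's own statement) =====
-- stated objective: faster
-- what changed: B never builds the n x n grid: it computes each diamond-border cell's value directly from its coordinates as row*n + col + 1 and sums them in a single O(n) pass over the rows.
-- outside the precondition, e.g. on diamond_sum(0): A raises IndexError, B returns 1; on diamond_sum(-1): A raises IndexError, B returns 4
import Mathlib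
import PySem

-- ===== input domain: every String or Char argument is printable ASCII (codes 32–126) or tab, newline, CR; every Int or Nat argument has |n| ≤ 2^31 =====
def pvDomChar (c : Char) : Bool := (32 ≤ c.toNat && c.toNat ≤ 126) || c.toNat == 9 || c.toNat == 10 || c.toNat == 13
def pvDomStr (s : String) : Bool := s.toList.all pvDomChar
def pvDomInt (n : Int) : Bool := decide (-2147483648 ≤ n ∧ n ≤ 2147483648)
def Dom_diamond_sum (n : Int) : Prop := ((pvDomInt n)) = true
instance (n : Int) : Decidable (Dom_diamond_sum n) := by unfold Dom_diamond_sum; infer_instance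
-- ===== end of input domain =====

-- B replaces A's O(n^2) grid construction with an O(n) pass that computes each
-- diamond-border cell directly from its coordinates (value = row*n + col + 1).

-- ===== PORT A =====
-- body of A's first loop: append i to the current row; push the row when it is full
def pvStep (n : Int) (s : List (List Int) × List Int) (i : Int) : List (List Int) × List Int :=
  let row := s.2 ++ [i]
  if (row.length : Int) == n then (s.1 ++ [row], ([] : List Int)) else (s.1, row)

-- list indexing is ported with pyGetD (defaults [] / 0): exact on Pre_ (1 ≤ n), where every
-- index A uses is in range; outside Pre_ Python raises IndexError and nothing is claimed.
def diamond_sum (n : Int) : Int :=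
  if n == 1 then 1
  else
    let st := (PySem.List.pyRange 1 (n*n+1)).foldl (pvStep n) ([], [])
    let diamond_list := st.1
    let h := PySem.Int.floordiv (n-1) 2
    let top_number := PySem.List.pyGetD (PySem.List.pyGetD diamond_list 0 []) h 0
    let bottom_number := PySem.List.pyGetD (PySem.List.pyGetD diamond_list (n-1) []) h 0
    let total := 0 + (top_number + bottom_number)
    let s1 := (PySem.List.pyRange 1 h).foldl
      (fun (s : Int × Int) j =>
        (s.1 + (PySem.List.pyGetD (PySem.List.pyGetD diamond_list j []) (h - s.2) 0
              + PySem.List.pyGetD (PySem.List.pyGetD diamond_list j []) (h + s.2) 0),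
         s.2 + 1)) (total, 1)
    let total2 := s1.1 + (PySem.List.pyGetD (PySem.List.pyGetD diamond_list h []) 0 0
                        + PySem.List.pyGetD (PySem.List.pyGetD diamond_list h []) (n-1) 0)
    let s2 := (PySem.List.pyRange (h+1) (n-1)).foldl
      (fun (s : Int × Int) k =>
        (s.1 + (PySem.List.pyGetD (PySem.List.pyGetD diamond_list k []) (0 + s.2) 0
              + PySem.List.pyGetD (PySem.List.pyGetD diamond_list k []) ((n-1) - s.2) 0),
         s.2 + 1)) (total2, 1)
    s2.1

def diamond_sum_alt (n : Int) : Int :=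
  if n == 1 then 1
  else
    let h := PySem.Int.floordiv (n-1) 2
    let t0 := (h + 1) + ((n - 1) * n + h + 1)
    let t1 := (PySem.List.pyRange 1 h).foldl (fun t j => t + 2*(j*n + h + 1)) t0
    let t2 := t1 + ((h*n + 1) + (h*n + n))
    (PySem.List.pyRange (h+1) (n-1)).foldl (fun t k => t + (2*k*n + n + 1)) t2


-- ===== PRECONDITION & SPEC =====
-- Pre_ excludes n ≤ 0, where A raises IndexError (diamond_list[0] on an empty list).
def Pre_diamond_sum (n : Int) : Prop := 1 ≤ n
instance (n : Int) : Decidable (Pre_diamond_sum n) := by unfold Pre_diamond_sum; infer_instance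
def pvWitness_diamond_sum : Int := 5

def Spec_diamond_sum (n : Int) (out : Int) : Prop := out = diamond_sum_alt n
instance (n : Int) (out : Int) : Decidable (Spec_diamond_sum n out) := by unfold Spec_diamond_sum; infer_instance

-- ===== CLAIM (what is proved, stated in full; the proofs are below) =====
def Claim_equal_diamond_sum : Prop := ∀ (n : Int), Dom_diamond_sum n → Pre_diamond_sum n → Spec_diamond_sum n (diamond_sum n)

-- ===== LEMMAS AND PROOFS =====

lemma pv_step_eq (n a : Int) (L : List (List Int)) (p : List Int) :
    pvStep n (L, p) a
      = if ((p.length : Int) + 1) == n then (L ++ [p ++ [a]], ([] : List Int)) else (L, p ++ [a]) := by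
  simp only [pvStep, List.length_append, List.length_cons, List.length_nil]
  norm_num

lemma pv_chunk (n : Int) : ∀ (c : Nat) (a : Int) (L : List (List Int)) (p : List Int),
    0 < c → (p.length : Int) + c = n →
    ((List.range c).map (fun i : Nat => a + (i : Int))).foldl (pvStep n) (L, p)
      = (L ++ [p ++ (List.range c).map (fun i : Nat => a + (i : Int))], []) := by
  intro c
  induction c with
  | zero => intro a L p hc; omega
  | succ k ih =>
    intro a L p _ hlen
    rw [List.range_succ_eq_map]
    simp only [List.map_cons, List.foldl_cons, List.map_map]
    rw [pv_step_eq]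
    rcases Nat.eq_zero_or_pos k with hk | hk
    · subst hk
      rw [if_pos (by simp only [beq_iff_eq]; push_cast at hlen ⊢; omega)]
      simp
    · rw [if_neg (by simp only [beq_iff_eq]; push_cast at hlen ⊢; omega)]
      have hcomp : ((fun i : Nat => a + (i : Int)) ∘ Nat.succ) = (fun i : Nat => (a + 1) + (i : Int)) := by
        funext i; simp [Nat.succ_eq_add_one]; ring
      simp only [Nat.cast_zero, add_zero]
      rw [hcomp, ih (a + 1) L (p ++ [a]) hk (by push_cast at hlen ⊢; simp; omega)]
      simp

lemma pv_range_shift (a : Int) (m : Nat) :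
    PySem.List.pyRange a (a + m) = (List.range m).map (fun c : Nat => a + (c : Int)) := by
  induction m with
  | zero => simp [PySem.List.pyRange]
  | succ k ih =>
    rw [show a + ((k + 1 : Nat) : Int) = (a + k) + 1 by push_cast; ring,
        PySem.List.pyRange_one_succ_right (by omega), ih, List.range_succ]
    simp

lemma pv_range1 (m : Nat) : PySem.List.pyRange 1 ((m : Int) + 1) = (List.range m).map (fun c : Nat => 1 + (c : Int)) := by
  rw [show ((m : Int) + 1) = 1 + (m : Int) by ring]; exact pv_range_shift 1 m

lemma pv_grid (N : Nat) (hN : 1 ≤ N) : ∀ (r : Nat), r ≤ N →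
    (PySem.List.pyRange 1 (((r * N : Nat) : Int) + 1)).foldl (pvStep (N : Int)) ([], [])
      = ((List.range r).map (fun ri : Nat => (List.range N).map (fun c : Nat => (ri : Int) * N + c + 1)), []) := by
  intro r
  induction r with
  | zero => intro _; simp [PySem.List.pyRange]
  | succ k ih =>
    intro hr
    rw [pv_range1, show (k + 1) * N = k * N + N by ring, List.range_add,
        List.map_append, List.foldl_append, List.map_map, ← pv_range1, ih (by omega)]
    have hmap : (List.map ((fun c : Nat => 1 + (c : Int)) ∘ (fun x => k * N + x)) (List.range N))
        = (List.range N).map (fun i : Nat => (((k * N : Nat) : Int) + 1) + (i : Int)) := by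
      apply List.map_congr_left; intro x _; simp; ring
    rw [hmap, pv_chunk (N : Int) N (((k * N : Nat) : Int) + 1) _ [] hN (by simp)]
    rw [List.range_succ, List.map_append]
    simp only [List.nil_append, List.map_cons, List.map_nil]
    congr 2
    apply congrArg (fun l => [l])
    apply List.map_congr_left; intro x _; push_cast; ring

lemma pv_cell (N : Nat) (r c : Int) (h0r : 0 ≤ r) (hrN : r < N) (h0c : 0 ≤ c) (hcN : c < N) :
    PySem.List.pyGetD (PySem.List.pyGetD
        ((List.range N).map (fun ri : Nat => (List.range N).map (fun cc : Nat => (ri : Int) * N + cc + 1))) r []) c 0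
      = r * N + c + 1 := by
  rw [PySem.List.pyGetD_of_nonneg _ _ h0r,
      PySem.List.getD_map_range _ _ _ _ (by omega),
      PySem.List.pyGetD_of_nonneg _ _ h0c,
      PySem.List.getD_map_range _ _ _ _ (by omega)]
  push_cast [Int.toNat_of_nonneg h0r, Int.toNat_of_nonneg h0c]
  ring

lemma pv_fold_margin (F : Int → Int → Int) (a : Int) : ∀ (m : Nat) (t mar : Int),
    ((List.range m).map (fun c : Nat => a + (c : Int))).foldl
        (fun (s : Int × Int) j => (s.1 + F j s.2, s.2 + 1)) (t, mar)
      = (t + ((List.range m).map (fun c : Nat => F (a + (c : Int)) (mar + (c : Int)))).sum, mar + m) := by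
  intro m
  induction m with
  | zero => intro t mar; simp
  | succ k ih =>
    intro t mar
    rw [List.range_succ]
    simp only [List.map_append, List.foldl_append, List.map_cons, List.map_nil, List.foldl_cons,
      List.foldl_nil, List.sum_append, List.sum_cons, List.sum_nil, ih]
    simp only [Prod.mk.injEq]
    constructor <;> push_cast <;> ring

lemma pv_range_eq (a b : Int) :
    PySem.List.pyRange a b = (List.range (b - a).toNat).map (fun c : Nat => a + (c : Int)) := by
  rcases le_total a b with hab | hab
  · calc PySem.List.pyRange a b
        = PySem.List.pyRange a (a + ((b - a).toNat : Int)) := by rw [show a + ((b - a).toNat : Int) = b by omega]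
      _ = _ := pv_range_shift a (b - a).toNat
  · rcases eq_or_lt_of_le hab with h | h
    · simp [h.symm, PySem.List.pyRange]
    · rw [show (b - a).toNat = 0 by omega]
      simp [PySem.List.pyRange]
      omega

theorem pv_main (n : Int) (pre : 1 ≤ n) : diamond_sum n = diamond_sum_alt n := by
  by_cases hn1 : n = 1
  · subst hn1; rfl
  have hn2 : 2 ≤ n := by omega
  lift n to Nat using (by omega) with N
  have hfalse : ((N : Int) == 1) = false := by simp; omega
  -- h bounds
  have hdm := PySem.Int.floordiv_mul_add_mod ((N : Int) - 1) 2
  have hm0 := PySem.Int.mod_nonneg ((N : Int) - 1) (by norm_num : (0:Int) < 2)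
  have hm1 := PySem.Int.mod_lt ((N : Int) - 1) (by norm_num : (0:Int) < 2)
  set h : Int := PySem.Int.floordiv ((N : Int) - 1) 2 with hh
  have hb : 0 ≤ h ∧ 2*h ≤ (N:Int) - 1 ∧ (N:Int) - 1 ≤ 2*h + 1 := by
    constructor
    · nlinarith [hm0, hm1, hdm]
    constructor
    · nlinarith
    · nlinarith
  have hhn : h ≤ (N:Int) - 2 := by nlinarith [hb.1, hb.2.1, hb.2.2, hn2]
  simp only [diamond_sum, diamond_sum_alt, hfalse, Bool.false_eq_true, if_false, ← hh]
  -- grid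
  have hNN : (N:Int) * N + 1 = ((N * N : Nat) : Int) + 1 := by push_cast; ring
  rw [hNN, pv_grid N (by omega) N le_rfl]
  set G : List (List Int) := (List.range N).map (fun ri : Nat => (List.range N).map (fun c : Nat => (ri : Int) * N + c + 1)) with hG
  have cell : ∀ r c : Int, 0 ≤ r → r < (N:Int) → 0 ≤ c → c < (N:Int) →
      PySem.List.pyGetD (PySem.List.pyGetD G r []) c 0 = r * N + c + 1 := by
    intro r c h1 h2 h3 h4; rw [hG]; exact pv_cell N r c h1 h2 h3 h4
  rw [cell 0 h le_rfl (by omega) (by omega) (by omega),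
      cell ((N:Int)-1) h (by omega) (by omega) (by omega) (by omega),
      cell h 0 (by omega) (by omega) le_rfl (by omega),
      cell h ((N:Int)-1) (by omega) (by omega) (by omega) (by omega)]
  rw [pv_range_eq 1 h, pv_range_eq (h+1) ((N:Int)-1)]
  rw [pv_fold_margin (fun j m => PySem.List.pyGetD (PySem.List.pyGetD G j []) (h - m) 0
        + PySem.List.pyGetD (PySem.List.pyGetD G j []) (h + m) 0) 1]
  rw [pv_fold_margin (fun k m => PySem.List.pyGetD (PySem.List.pyGetD G k []) (0 + m) 0
        + PySem.List.pyGetD (PySem.List.pyGetD G k []) ((N:Int) - 1 - m) 0) (h+1)]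
  rw [PySem.List.foldl_add, PySem.List.foldl_add, List.map_map, List.map_map]
  have e1 : (List.map
              (fun c : Nat =>
                PySem.List.pyGetD (PySem.List.pyGetD G (1 + (c:Int)) []) (h - (1 + (c:Int))) 0 +
                  PySem.List.pyGetD (PySem.List.pyGetD G (1 + (c:Int)) []) (h + (1 + (c:Int))) 0)
              (List.range (h - 1).toNat))
      = List.map ((fun j => 2 * (j * (N:Int) + h + 1)) ∘ fun c : Nat => 1 + (c:Int)) (List.range (h - 1).toNat) := by
    apply List.map_congr_left
    intro c hc
    rw [List.mem_range] at hc
    have hc' : (c : Int) < h - 1 := by omega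
    rw [cell (1 + c) (h - (1 + c)) (by omega) (by omega) (by omega) (by omega),
        cell (1 + c) (h + (1 + c)) (by omega) (by omega) (by omega) (by omega)]
    simp only [Function.comp]
    ring
  have e2 : (List.map
          (fun c : Nat =>
            PySem.List.pyGetD (PySem.List.pyGetD G (h + 1 + (c:Int)) []) (0 + (1 + (c:Int))) 0 +
              PySem.List.pyGetD (PySem.List.pyGetD G (h + 1 + (c:Int)) []) ((N:Int) - 1 - (1 + (c:Int))) 0)
          (List.range ((N:Int) - 1 - (h + 1)).toNat))
      = List.map ((fun k => 2 * k * (N:Int) + (N:Int) + 1) ∘ fun c : Nat => h + 1 + (c:Int)) (List.range ((N:Int) - 1 - (h + 1)).toNat) := by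
    apply List.map_congr_left
    intro c hc
    rw [List.mem_range] at hc
    have hc' : (c : Int) < (N:Int) - 1 - (h + 1) := by omega
    rw [cell (h + 1 + c) (0 + (1 + c)) (by omega) (by omega) (by omega) (by omega),
        cell (h + 1 + c) ((N:Int) - 1 - (1 + c)) (by omega) (by omega) (by omega) (by omega)]
    simp only [Function.comp]
    ring
  rw [e1, e2]
  ring

-- ===== VERDICT (by name: the statement is the Claim_ definition above) =====
theorem diamond_sum_spec : Claim_equal_diamond_sum := by
  intro n _ pre
  show diamond_sum n = diamond_sum_alt n
  exact pv_main n pre
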